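-- pv_equiv track=rewrite | github.com/mariabaladuggimpudi/data-struct-n-algos | epi_judge_python/gasup_problem.py | gasup_problem
-- ===== SOURCE A (Python) =====
-- def gasup_problem(gallons, distance):
--     mileage = 20
--     min_city_n_dist = (0, 0)
--     city_no_count = 1
--     mileage_remaining = 0
--     for g, d in zip(gallons, distance):
--         next_city_mileage_remaining = g*mileage - d + mileage_remaining
--         if next_city_mileage_remaining < min_city_n_dist[1]:
--             min_city_n_dist = (city_no_count+1, next_city_mileage_remaining)
--         mileage_remaining = next_city_mileage_remaining
--         city_no_count += 1
--     return min_city_n_dist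
-- ===== SOURCE B (Python) =====
-- def gasup_problem(gallons, distance):
--     # two-pass: build the cumulative-mileage list, then take min + first index
--     prefix = []
--     total = 0
--     for g, d in zip(gallons, distance):
--         total += g * 20 - d
--         prefix.append(total)
--     if not prefix:
--         return (0, 0)
--     m = min(prefix)
--     if m < 0:
--         return (prefix.index(m) + 2, m)
--     return (0, 0)
-- ===== Notes on version B (the rewrite author's own statement) =====
-- stated objective: alternative
-- what changed: Replaced A's single running-min-with-counter loop by a two-pass decomposition: first materialise the cumulative mileage prefix list, then use min() and list.index() to find the minimum value and its first position.
import Mathlib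
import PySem

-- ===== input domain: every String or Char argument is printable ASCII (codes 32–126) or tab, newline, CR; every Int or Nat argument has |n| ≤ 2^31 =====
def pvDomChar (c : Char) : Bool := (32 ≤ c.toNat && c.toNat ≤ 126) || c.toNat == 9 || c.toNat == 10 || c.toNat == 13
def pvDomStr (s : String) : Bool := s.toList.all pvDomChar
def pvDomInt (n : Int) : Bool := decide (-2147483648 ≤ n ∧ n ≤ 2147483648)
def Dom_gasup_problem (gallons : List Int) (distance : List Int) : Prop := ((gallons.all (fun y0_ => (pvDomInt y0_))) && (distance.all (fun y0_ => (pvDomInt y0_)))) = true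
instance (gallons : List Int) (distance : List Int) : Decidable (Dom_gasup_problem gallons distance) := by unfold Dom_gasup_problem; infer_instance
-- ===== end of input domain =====

-- B replaces A's running-min loop by a two-pass decomposition (prefix list, then min + first index); same O(n) cost.

-- ===== PORT A =====
-- A's for-loop over zip(gallons, distance) with state (min_city_n_dist, city_no_count, mileage_remaining)
def pvLoopA (b : Int × Int) (cnt rem : Int) : List (Int × Int) → Int × Int
  | [] => b
  | (g, d) :: t =>
    let n := g * 20 - d + rem
    pvLoopA (if n < b.2 then (cnt + 1, n) else b) (cnt + 1) n t

def gasup_problem (gallons : List Int) (distance : List Int) : Int × Int :=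
  pvLoopA (0, 0) 1 0 (gallons.zip distance)

-- ===== PORT B =====
-- B's accumulation loop building the prefix list (total += g*20 - d; prefix.append(total))
def pvAccum (total : Int) : List (Int × Int) → List Int
  | [] => []
  | (g, d) :: t =>
    let n := total + (g * 20 - d)
    n :: pvAccum n t

def gasup_problem_alt (gallons : List Int) (distance : List Int) : Int × Int :=
  let pre := pvAccum 0 (gallons.zip distance)
  if pre = [] then (0, 0)
  else
    match PySem.List.min? pre (fun y => y) with
    | none => (0, 0)
    | some m =>
      if m < 0 then ((((PySem.List.index? pre m).getD 0 : Nat) : Int) + 2, m)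
      else (0, 0)

-- ===== PRECONDITION & SPEC =====
def Spec_gasup_problem (gallons : List Int) (distance : List Int) (out : Int × Int) : Prop := out = gasup_problem_alt gallons distance
instance (gallons : List Int) (distance : List Int) (out : Int × Int) : Decidable (Spec_gasup_problem gallons distance out) := by unfold Spec_gasup_problem; infer_instance

-- ===== CLAIM (what is proved, stated in full; the proofs are below) =====
def Claim_equal_gasup_problem : Prop := ∀ (gallons : List Int) (distance : List Int), Dom_gasup_problem gallons distance → Spec_gasup_problem gallons distance (gasup_problem gallons distance)

-- ===== LEMMAS AND PROOFS =====

-- min(x :: l) via min? on the tail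
lemma foldl_min_eq_min? (l : List Int) (x : Int) :
    l.foldl min x =
      match PySem.List.min? l (fun y => y) with
      | none => x
      | some m => min x m := by
  induction l generalizing x with
  | nil => simp [PySem.List.min?]
  | cons y t ih =>
    rw [List.foldl_cons, ih, PySem.List.min?_id_cons, ih y]
    cases h : PySem.List.min? t (fun y => y) with
    | none => simp
    | some m => simp [min_assoc]

-- the reference shape both ports reduce to
lemma pvLoopA_eq (l : List (Int × Int)) (b : Int × Int) (cnt rem : Int) :
    pvLoopA b cnt rem l =
      match PySem.List.min? (pvAccum rem l) (fun y => y) with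
      | none => b
      | some m =>
        if m < b.2 then ((((PySem.List.index? (pvAccum rem l) m).getD 0 : Nat) : Int) + cnt + 1, m)
        else b := by
  induction l generalizing b cnt rem with
  | nil => simp [pvLoopA, pvAccum, PySem.List.min?]
  | cons gd t ih =>
    obtain ⟨g, d⟩ := gd
    have hn : rem + (g * 20 - d) = g * 20 - d + rem := by ring
    set n := g * 20 - d + rem with hn'
    have hacc : pvAccum rem ((g, d) :: t) = n :: pvAccum n t := by
      simp [pvAccum, hn]
    rw [show pvLoopA b cnt rem ((g, d) :: t)
          = pvLoopA (if n < b.2 then (cnt + 1, n) else b) (cnt + 1) n t from rfl,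
        ih, hacc, PySem.List.min?_id_cons, foldl_min_eq_min?]
    cases hr : PySem.List.min? (pvAccum n t) (fun y => y) with
    | none =>
      -- tail prefix list is empty
      have ht : pvAccum n t = [] := (PySem.List.min?_eq_none_iff _ _).mp hr
      rw [ht] at hr ⊢
      simp only [PySem.List.index?_cons_self, Option.getD_some]
      split_ifs with h1 h2 <;> simp_all <;> omega
    | some mr =>
      have hmem : mr ∈ pvAccum n t := PySem.List.min?_mem hr
      obtain ⟨i, hi⟩ : ∃ i, PySem.List.index? (pvAccum n t) mr = some i := by
        have := (PySem.List.index?_isSome_iff (pvAccum n t) mr).mpr hmem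
        exact Option.isSome_iff_exists.mp this
      by_cases hcmp : mr < n
      · -- the overall minimum lies in the tail; its first index shifts by one
        have hne : n ≠ mr := by omega
        have hmin : min n mr = mr := by omega
        dsimp only
        rw [hmin, PySem.List.index?_cons_of_ne (h := hne), hi]
        simp only [Option.map_some, Option.getD_some]
        split_ifs with h1 h2 h2 <;> simp_all <;> first | rfl | omega | (exfalso; omega)
      · -- the head is the (first) minimum
        have hmin : min n mr = n := by omega
        dsimp only
        rw [hmin, PySem.List.index?_cons_self]
        simp only [Option.getD_some]
        split_ifs with h1 h2 h2 <;> simp_all <;> first | rfl | omega | (exfalso; omega)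

-- ===== VERDICT (by name: the statement is the Claim_ definition above) =====
theorem gasup_problem_spec : Claim_equal_gasup_problem := by
  intro gallons distance _
  unfold Spec_gasup_problem gasup_problem gasup_problem_alt
  rw [pvLoopA_eq]
  cases h : PySem.List.min? (pvAccum 0 (gallons.zip distance)) (fun y => y) with
  | none =>
    have : pvAccum 0 (gallons.zip distance) = [] := (PySem.List.min?_eq_none_iff _ _).mp h
    simp [this, PySem.List.min?] at h ⊢
  | some m =>
    have hne : pvAccum 0 (gallons.zip distance) ≠ [] := by
      intro he; rw [he] at h; simp [PySem.List.min?] at h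
    simp only [h, hne, if_false]
    split_ifs with h1
    · simp [Prod.ext_iff]; omega
    · simp
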